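-- pv_equiv track=rewrite | github.com/22507260/AI-PCB-Generator | src/models/vrml_parser.py | _skip_block
-- ===== SOURCE A (Python) =====
-- def _skip_block(tokens: list[str], pos: int) -> int:
--     """Skip a { ... } block."""
--     depth = 1
--     while pos < len(tokens) and depth > 0:
--         if tokens[pos] == '{':
--             depth += 1
--         elif tokens[pos] == '}':
--             depth -= 1
--         pos += 1
--     return pos
-- ===== SOURCE B (Python) =====
-- def _skip_block(tokens: list[str], pos: int) -> int:
--     """Skip a { ... } block by recursive descent: '{' recurses into the
--     nested block, '}' closes this one."""
--     n = len(tokens)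
--     while pos < n:
--         tok = tokens[pos]
--         pos += 1
--         if tok == '}':
--             return pos
--         if tok == '{':
--             pos = _skip_block(tokens, pos)
--     return pos
-- ===== Notes on version B (the rewrite author's own statement) =====
-- stated objective: alternative
-- what changed: Replaces the explicit depth counter with recursive descent: the loop consumes one token at a time, returns right after a '}', and recurses on '{' to skip the nested block, resuming from the returned position.
import Mathlib
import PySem

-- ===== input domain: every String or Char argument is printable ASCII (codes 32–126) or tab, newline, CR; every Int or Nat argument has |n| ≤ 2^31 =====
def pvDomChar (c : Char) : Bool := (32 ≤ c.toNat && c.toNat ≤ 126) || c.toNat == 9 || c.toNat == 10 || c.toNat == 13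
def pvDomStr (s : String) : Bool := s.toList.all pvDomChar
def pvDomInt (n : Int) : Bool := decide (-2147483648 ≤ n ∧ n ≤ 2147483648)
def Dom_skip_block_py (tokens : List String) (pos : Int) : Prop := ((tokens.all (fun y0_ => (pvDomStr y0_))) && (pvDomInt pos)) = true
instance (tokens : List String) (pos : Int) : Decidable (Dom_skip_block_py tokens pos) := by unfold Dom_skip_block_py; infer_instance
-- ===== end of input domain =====

-- B replaces A's explicit depth counter by recursive descent (recursing on '{' to skip the
-- nested block); same return value, same cost.

-- ===== PORT A =====
-- A's while loop: state (pos, depth); pyGet? none = Python IndexError, unreachable under Pre_.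
def skipALoop (tokens : List String) (pos depth : Int) : Int :=
  if _h : pos < (tokens.length : Int) ∧ 0 < depth then
    match PySem.List.pyGet? tokens pos with
    | none => pos   -- IndexError in Python; excluded by Pre_skip_block_py
    | some tok =>
        skipALoop tokens (pos + 1)
          (if tok = "{" then depth + 1 else if tok = "}" then depth - 1 else depth)
  else pos
termination_by ((tokens.length : Int) - pos).toNat
decreasing_by omega

def skip_block_py (tokens : List String) (pos : Int) : Int :=
  skipALoop tokens pos 1

-- ===== PORT B =====
-- B's recursive descent; the fuel argument only makes the recursion total
-- (it is (len - pos).toNat at the top call, enough for every step Python B takes).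
def skipBGo (tokens : List String) : Nat → Int → Int
  | 0, pos => pos
  | fuel + 1, pos =>
    if pos < (tokens.length : Int) then
      match PySem.List.pyGet? tokens pos with
      | none => pos   -- IndexError in Python; excluded by Pre_skip_block_py
      | some tok =>
          if tok = "}" then pos + 1
          else if tok = "{" then skipBGo tokens fuel (skipBGo tokens fuel (pos + 1))
          else skipBGo tokens fuel (pos + 1)
    else pos

def skip_block_py_alt (tokens : List String) (pos : Int) : Int :=
  skipBGo tokens ((tokens.length : Int) - pos).toNat pos

-- ===== PRECONDITION & SPEC =====
-- Pre_ excludes exactly the inputs where Python A raises IndexError: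
-- pos < -len(tokens) (negative index out of range). B raises there too.
def Pre_skip_block_py (tokens : List String) (pos : Int) : Prop :=
  -(tokens.length : Int) ≤ pos
instance (tokens : List String) (pos : Int) : Decidable (Pre_skip_block_py tokens pos) := by
  unfold Pre_skip_block_py; infer_instance

def pvWitness_skip_block_py : List String × Int := (["point", "{", "0", "}", "}"], 0)

def Spec_skip_block_py (tokens : List String) (pos : Int) (out : Int) : Prop :=
  out = skip_block_py_alt tokens pos
instance (tokens : List String) (pos : Int) (out : Int) : Decidable (Spec_skip_block_py tokens pos out) := by
  unfold Spec_skip_block_py; infer_instance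

-- ===== CLAIM (what is proved, stated in full; the proofs are below) =====
def Claim_equal_skip_block_py : Prop := ∀ (tokens : List String) (pos : Int), Dom_skip_block_py tokens pos → Pre_skip_block_py tokens pos → Spec_skip_block_py tokens pos (skip_block_py tokens pos)

-- ===== LEMMAS AND PROOFS =====

-- skipBGo never moves backwards
theorem skipBGo_ge (tokens : List String) (fuel : Nat) :
    ∀ pos : Int, pos ≤ skipBGo tokens fuel pos := by
  induction fuel with
  | zero => intro pos; simp [skipBGo]
  | succ f ih =>
      intro pos
      simp only [skipBGo]
      split
      · match h : PySem.List.pyGet? tokens pos with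
        | none => simp
        | some tok =>
            simp only
            split
            · omega
            · split
              · have h1 := ih (pos + 1)
                have h2 := ih (skipBGo tokens f (pos + 1))
                omega
              · have h1 := ih (pos + 1); omega
      · omega

-- positions ≥ len are fixed points of skipBGo
theorem skipBGo_fix (tokens : List String) (fuel : Nat) (pos : Int)
    (h : (tokens.length : Int) ≤ pos) : skipBGo tokens fuel pos = pos := by
  cases fuel with
  | zero => simp [skipBGo]
  | succ f => simp only [skipBGo]; rw [if_neg (by omega)]

-- fuel is irrelevant once it is at least (len - pos).toNat
theorem skipBGo_fuel_irrel (tokens : List String) :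
    ∀ fuel fuel' : Nat, ∀ pos : Int,
      ((tokens.length : Int) - pos).toNat ≤ fuel → ((tokens.length : Int) - pos).toNat ≤ fuel' →
      skipBGo tokens fuel pos = skipBGo tokens fuel' pos := by
  intro fuel
  induction fuel with
  | zero =>
      intro fuel' pos h h'
      have hlen : (tokens.length : Int) ≤ pos := by omega
      rw [skipBGo_fix tokens 0 pos hlen, skipBGo_fix tokens fuel' pos hlen]
  | succ f ih =>
      intro fuel' pos h h'
      cases fuel' with
      | zero =>
          have hlen : (tokens.length : Int) ≤ pos := by omega
          rw [skipBGo_fix tokens (f + 1) pos hlen, skipBGo_fix tokens 0 pos hlen]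
      | succ f' =>
          by_cases hp : pos < (tokens.length : Int)
          · simp only [skipBGo]
            rw [if_pos hp, if_pos hp]
            match hg : PySem.List.pyGet? tokens pos with
            | none => rfl
            | some tok =>
                simp only
                split
                · rfl
                · have hf : ((tokens.length : Int) - (pos + 1)).toNat ≤ f := by omega
                  have hf' : ((tokens.length : Int) - (pos + 1)).toNat ≤ f' := by omega
                  split
                  · have hinner : skipBGo tokens f (pos + 1) = skipBGo tokens f' (pos + 1) :=
                      ih f' (pos + 1) hf hf'
                    rw [← hinner]
                    set q := skipBGo tokens f (pos + 1) with hq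
                    have hq1 : pos + 1 ≤ q := skipBGo_ge tokens f (pos + 1)
                    exact ih f' q (by omega) (by omega)
                  · exact ih f' (pos + 1) hf hf'
          · rw [skipBGo_fix tokens (f + 1) pos (by omega), skipBGo_fix tokens (f' + 1) pos (by omega)]

-- one-step unfolding of B's top-level function
theorem alt_fix (tokens : List String) (pos : Int) (h : (tokens.length : Int) ≤ pos) :
    skip_block_py_alt tokens pos = pos := by
  unfold skip_block_py_alt; exact skipBGo_fix tokens _ pos h

theorem alt_step (tokens : List String) (pos : Int) (hp : pos < (tokens.length : Int)) :
    skip_block_py_alt tokens pos =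
      match PySem.List.pyGet? tokens pos with
      | none => pos
      | some tok =>
          if tok = "}" then pos + 1
          else if tok = "{" then skip_block_py_alt tokens (skip_block_py_alt tokens (pos + 1))
          else skip_block_py_alt tokens (pos + 1) := by
  unfold skip_block_py_alt
  have hm : ∃ m, ((tokens.length : Int) - pos).toNat = m + 1 := ⟨((tokens.length : Int) - pos).toNat - 1, by omega⟩
  obtain ⟨m, hm⟩ := hm
  rw [hm]
  simp only [skipBGo]
  rw [if_pos hp]
  match hg : PySem.List.pyGet? tokens pos with
  | none => rfl
  | some tok =>
      simp only
      split
      · rfl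
      · have hf : ((tokens.length : Int) - (pos + 1)).toNat ≤ m := by omega
        have hinner : skipBGo tokens m (pos + 1) =
            skipBGo tokens ((tokens.length : Int) - (pos + 1)).toNat (pos + 1) :=
          skipBGo_fuel_irrel tokens m _ (pos + 1) hf le_rfl
        split
        · rw [hinner]
          set q := skipBGo tokens ((tokens.length : Int) - (pos + 1)).toNat (pos + 1) with hq
          have hq1 : pos + 1 ≤ q := skipBGo_ge tokens _ (pos + 1)
          exact skipBGo_fuel_irrel tokens m _ q (by omega) le_rfl
        · exact hinner

-- step lemmas for A's loop
theorem skipALoop_step (tokens : List String) (pos depth : Int)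
    (h : pos < (tokens.length : Int) ∧ 0 < depth) (tok : String)
    (hg : PySem.List.pyGet? tokens pos = some tok) :
    skipALoop tokens pos depth =
      skipALoop tokens (pos + 1)
        (if tok = "{" then depth + 1 else if tok = "}" then depth - 1 else depth) := by
  conv_lhs => rw [skipALoop]
  rw [dif_pos h, hg]

theorem skipALoop_none (tokens : List String) (pos depth : Int)
    (h : pos < (tokens.length : Int) ∧ 0 < depth)
    (hg : PySem.List.pyGet? tokens pos = none) :
    skipALoop tokens pos depth = pos := by
  conv_lhs => rw [skipALoop]
  rw [dif_pos h, hg]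

theorem skipALoop_stop (tokens : List String) (pos depth : Int)
    (h : ¬(pos < (tokens.length : Int) ∧ 0 < depth)) :
    skipALoop tokens pos depth = pos := by
  conv_lhs => rw [skipALoop]
  rw [dif_neg h]

-- A's loop at depth d equals d iterations of B (the depth counter counts pending '}')
theorem skipALoop_eq_iter (tokens : List String) :
    ∀ pos depth : Int, 0 ≤ depth →
      skipALoop tokens pos depth = (skip_block_py_alt tokens)^[depth.toNat] pos := by
  intro pos depth
  induction pos, depth using skipALoop.induct tokens with
  | case1 pos depth h hg =>
      -- pos < len but pyGet? = none (IndexError side); both sides fix pos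
      intro _
      rcases h with ⟨hp, hdpos⟩
      rw [skipALoop_none tokens pos depth ⟨hp, hdpos⟩ hg]
      have hfix : skip_block_py_alt tokens pos = pos := by
        rw [alt_step tokens pos hp, hg]
      exact (Function.iterate_fixed hfix depth.toNat).symm
  | case2 pos depth h tok hg ih =>
      intro hd
      rcases h with ⟨hp, hdpos⟩
      have hd1 : 1 ≤ depth.toNat := by omega
      have step := alt_step tokens pos hp
      rw [hg] at step
      simp only at step
      rw [skipALoop_step tokens pos depth ⟨hp, hdpos⟩ tok hg]
      obtain ⟨e, he⟩ : ∃ e, depth.toNat = e + 1 := ⟨depth.toNat - 1, by omega⟩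
      by_cases hb : tok = "{"
      · -- '{' : depth+1
        rw [if_neg (by rw [hb]; decide), if_pos hb] at step
        rw [if_pos hb]
        rw [dif_pos hb] at ih
        rw [ih (by omega)]
        have h2 : (depth + 1).toNat = (e + 1) + 1 := by omega
        calc (skip_block_py_alt tokens)^[(depth + 1).toNat] (pos + 1)
            = (skip_block_py_alt tokens)^[(e + 1) + 1] (pos + 1) := by rw [h2]
          _ = (skip_block_py_alt tokens)^[e]
                (skip_block_py_alt tokens (skip_block_py_alt tokens (pos + 1))) := by
              rw [Function.iterate_succ_apply, Function.iterate_succ_apply]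
          _ = (skip_block_py_alt tokens)^[e] (skip_block_py_alt tokens pos) := by rw [← step]
          _ = (skip_block_py_alt tokens)^[e + 1] pos :=
              (Function.iterate_succ_apply (skip_block_py_alt tokens) e pos).symm
          _ = (skip_block_py_alt tokens)^[depth.toNat] pos := by rw [← he]
      · by_cases hc : tok = "}"
        · -- '}' : depth-1
          rw [if_pos hc] at step
          rw [if_neg hb, if_pos hc]
          rw [dif_neg hb, dif_pos hc] at ih
          rw [ih (by omega)]
          have he1 : depth.toNat = (depth - 1).toNat + 1 := by omega
          calc (skip_block_py_alt tokens)^[(depth - 1).toNat] (pos + 1)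
              = (skip_block_py_alt tokens)^[(depth - 1).toNat] (skip_block_py_alt tokens pos) := by
                rw [step]
            _ = (skip_block_py_alt tokens)^[(depth - 1).toNat + 1] pos :=
                (Function.iterate_succ_apply (skip_block_py_alt tokens) _ pos).symm
            _ = (skip_block_py_alt tokens)^[depth.toNat] pos := by rw [← he1]
        · -- other token: depth unchanged
          rw [if_neg hc, if_neg hb] at step
          rw [if_neg hb, if_neg hc]
          rw [dif_neg hb, dif_neg hc] at ih
          rw [ih (by omega)]
          calc (skip_block_py_alt tokens)^[depth.toNat] (pos + 1)
              = (skip_block_py_alt tokens)^[e + 1] (pos + 1) := by rw [he]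
            _ = (skip_block_py_alt tokens)^[e] (skip_block_py_alt tokens (pos + 1)) :=
                Function.iterate_succ_apply (skip_block_py_alt tokens) e (pos + 1)
            _ = (skip_block_py_alt tokens)^[e] (skip_block_py_alt tokens pos) := by rw [← step]
            _ = (skip_block_py_alt tokens)^[e + 1] pos :=
                (Function.iterate_succ_apply (skip_block_py_alt tokens) e pos).symm
            _ = (skip_block_py_alt tokens)^[depth.toNat] pos := by rw [← he]
  | case3 pos depth h =>
      -- loop guard false: pos ≥ len or depth ≤ 0
      intro hd
      rw [skipALoop_stop tokens pos depth h]
      by_cases hp : pos < (tokens.length : Int)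
      · have hdz : depth = 0 := by omega
        rw [hdz]; rfl
      · exact (Function.iterate_fixed (alt_fix tokens pos (by omega)) depth.toNat).symm

-- ===== VERDICT (by name: the statement is the Claim_ definition above) =====
theorem skip_block_py_spec : Claim_equal_skip_block_py := by
  intro tokens pos _ _
  unfold Spec_skip_block_py skip_block_py
  rw [skipALoop_eq_iter tokens pos 1 (by omega)]
  rfl
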